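-- pv_equiv track=rewrite | github.com/shubham3-ucb/sparse-attention-hub | visualize_rope_experiments.py | group_metrics_by_sample
-- ===== SOURCE A (Python) =====
-- from typing import Dict, List, Tuple, Any
--
-- def group_metrics_by_sample(metrics: List[Dict], chunk_threshold: int = 100) -> List[List[Dict]]:
--     """
--     Group metrics by sample/example.
--
--     Detects sample boundaries by:
--     - Reset to first chunk (seq_len_q == seq_len_k and seq_len_q >= chunk_threshold) after generation (seq_len_q == 1)
--     - Handles variable chunk sizes (e.g., 4096, 2258, etc.)
--
--     Args:
--         metrics: List of all metrics
--         chunk_threshold: Threshold for distinguishing chunks from generation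
--
--     Returns:
--         List of sample groups, each containing metrics for one sample
--     """
--     if not metrics:
--         return []
--
--     samples: List[List[Dict]] = []
--     current_sample: List[Dict] = []
--
--     prev_seq_len_q = None
--
--     for metric in metrics:
--         metadata = metric.get("metadata", {})
--         seq_len_q = metadata.get("seq_len_q", 0)
--         seq_len_k = metadata.get("seq_len_k", 0)
--
--         # Detect new sample: reset to first chunk (seq_len_q == seq_len_k and >= chunk_threshold) after generation (seq_len_q == 1)
--         is_new_sample = False
--
--         if prev_seq_len_q == 1 and seq_len_q == seq_len_k and seq_len_q >= chunk_threshold: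
--             # Reset to first chunk after generation = new sample
--             # First chunk: seq_len_q == seq_len_k (no prefix yet)
--             is_new_sample = True
--
--         if is_new_sample and current_sample:
--             samples.append(current_sample)
--             current_sample = []
--
--         current_sample.append(metric)
--         prev_seq_len_q = seq_len_q
--
--     # Add last sample
--     if current_sample:
--         samples.append(current_sample)
--
--     return samples
-- ===== SOURCE B (Python) =====
-- def group_metrics_by_sample(metrics, chunk_threshold=100):
--     """Two-pass grouping: precompute boundary flags by zipping (q,k) pairs with
--     their predecessors, then build groups by appending to the last group or
--     starting a new one where a flag is set."""
--     def qk(m):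
--         md = m.get("metadata", {})
--         return (md.get("seq_len_q", 0), md.get("seq_len_k", 0))
--     pairs = [qk(m) for m in metrics]
--     flags = [False] + [p[0] == 1 and c[0] == c[1] and c[0] >= chunk_threshold
--                        for p, c in zip(pairs, pairs[1:])]
--     groups = []
--     for m, f in zip(metrics, flags):
--         if f or not groups:
--             groups.append([m])
--         else:
--             groups[-1].append(m)
--     return groups
-- ===== Notes on version B (the rewrite author's own statement) =====
-- stated objective: alternative
-- what changed: Replaces A's single stateful loop (samples/current_sample/prev_seq_len_q accumulator) by two passes: first precompute boundary flags by zipping the (seq_len_q, seq_len_k) pairs with their predecessors, then group by appending each metric to the last group or opening a new one where its flag is set.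
import Mathlib
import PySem

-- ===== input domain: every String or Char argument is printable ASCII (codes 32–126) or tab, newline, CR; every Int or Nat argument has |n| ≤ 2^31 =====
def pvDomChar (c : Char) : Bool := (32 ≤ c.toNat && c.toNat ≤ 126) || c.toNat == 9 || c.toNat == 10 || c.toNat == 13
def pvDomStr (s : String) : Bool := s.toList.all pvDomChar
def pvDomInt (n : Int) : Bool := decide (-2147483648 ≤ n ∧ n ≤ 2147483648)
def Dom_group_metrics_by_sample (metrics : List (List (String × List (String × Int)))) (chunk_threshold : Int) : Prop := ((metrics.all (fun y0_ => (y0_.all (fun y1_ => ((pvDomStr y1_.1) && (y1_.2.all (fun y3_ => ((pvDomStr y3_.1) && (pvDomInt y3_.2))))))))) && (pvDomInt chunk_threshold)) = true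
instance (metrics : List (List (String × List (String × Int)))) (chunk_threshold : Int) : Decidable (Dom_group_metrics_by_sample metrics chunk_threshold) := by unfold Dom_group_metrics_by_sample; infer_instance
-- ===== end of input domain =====

-- B replaces A's single stateful loop (samples/current_sample/prev_seq_len_q accumulator)
-- by a boundary-flag precomputation pass plus a grouping pass (alternative decomposition, same cost).

-- ===== PORT A =====
-- hand port of dict.get(k, dflt) on the association list: first matching key, else default (exact for Python dicts)
def pvGetD {α : Type} (d : List (String × α)) (k : String) (dflt : α) : α :=
  match d.find? (fun kv => kv.1 == k) with
  | some kv => kv.2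
  | none => dflt

-- loop body of A's for-loop, over state (samples, current_sample, prev_seq_len_q)
def pvStepA (chunk_threshold : Int)
    (st : List (List (List (String × List (String × Int)))) × List (List (String × List (String × Int))) × Option Int)
    (metric : List (String × List (String × Int))) :
    List (List (List (String × List (String × Int)))) × List (List (String × List (String × Int))) × Option Int :=
  let metadata := pvGetD metric "metadata" []
  let seq_len_q := pvGetD metadata "seq_len_q" 0
  let seq_len_k := pvGetD metadata "seq_len_k" 0
  let is_new_sample := (st.2.2 == some 1) && (seq_len_q == seq_len_k) && decide (chunk_threshold ≤ seq_len_q)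
  if is_new_sample && !(st.2.1 == []) then
    (st.1 ++ [st.2.1], [metric], some seq_len_q)
  else
    (st.1, st.2.1 ++ [metric], some seq_len_q)

def group_metrics_by_sample (metrics : List (List (String × List (String × Int)))) (chunk_threshold : Int) : List (List (List (String × List (String × Int)))) :=
  if metrics == [] then []
  else
    let st := metrics.foldl (pvStepA chunk_threshold) ([], [], none)
    -- "if current_sample: samples.append(current_sample)"
    if st.2.1 == [] then st.1 else st.1 ++ [st.2.1]

-- ===== PORT B =====
-- helper qk of B
def pvQK (m : List (String × List (String × Int))) : Int × Int :=
  let md := pvGetD m "metadata" []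
  (pvGetD md "seq_len_q" 0, pvGetD md "seq_len_k" 0)

-- loop body of B's grouping pass (append to last group, or start a new one)
def pvStepB (groups : List (List (List (String × List (String × Int)))))
    (mf : List (String × List (String × Int)) × Bool) :
    List (List (List (String × List (String × Int)))) :=
  if mf.2 || groups == [] then groups ++ [[mf.1]]
  else groups.dropLast ++ [groups.getLastD [] ++ [mf.1]]

def group_metrics_by_sample_alt (metrics : List (List (String × List (String × Int)))) (chunk_threshold : Int) : List (List (List (String × List (String × Int)))) :=
  let pairs := metrics.map pvQK
  let flags := false :: (pairs.zip pairs.tail).map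
    (fun pc => (pc.1.1 == 1) && (pc.2.1 == pc.2.2) && decide (chunk_threshold ≤ pc.2.1))
  (metrics.zip flags).foldl pvStepB []

-- ===== PRECONDITION & SPEC =====
def Spec_group_metrics_by_sample (metrics : List (List (String × List (String × Int)))) (chunk_threshold : Int) (out : List (List (List (String × List (String × Int))))) : Prop := out = group_metrics_by_sample_alt metrics chunk_threshold
instance (metrics : List (List (String × List (String × Int)))) (chunk_threshold : Int) (out : List (List (List (String × List (String × Int))))) : Decidable (Spec_group_metrics_by_sample metrics chunk_threshold out) := by unfold Spec_group_metrics_by_sample; infer_instance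

-- ===== CLAIM (what is proved, stated in full; the proofs are below) =====
def Claim_equal_group_metrics_by_sample : Prop := ∀ (metrics : List (List (String × List (String × Int)))) (chunk_threshold : Int), Dom_group_metrics_by_sample metrics chunk_threshold → Spec_group_metrics_by_sample metrics chunk_threshold (group_metrics_by_sample metrics chunk_threshold)

-- ===== LEMMAS AND PROOFS =====

-- flags of the remaining metrics, given the previous element's seq_len_q
def pvFlagsFrom (t q0 : Int) : List (List (String × List (String × Int))) → List Bool
  | [] => []
  | m :: r => ((q0 == 1) && ((pvQK m).1 == (pvQK m).2) && decide (t ≤ (pvQK m).1)) :: pvFlagsFrom t (pvQK m).1 r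

-- B's zip-built flag list is pvFlagsFrom of the tail
lemma pvFlags_eq (t : Int) : ∀ (r : List (List (String × List (String × Int)))) (m0 : List (String × List (String × Int))),
    ((pvQK m0 :: r.map pvQK).zip (r.map pvQK)).map
      (fun pc => (pc.1.1 == 1) && (pc.2.1 == pc.2.2) && decide (t ≤ pc.2.1))
    = pvFlagsFrom t (pvQK m0).1 r := by
  intro r
  induction r with
  | nil => intro m0; rfl
  | cons m r ih =>
    intro m0
    simp only [List.map_cons, List.zip_cons_cons, pvFlagsFrom]
    exact congrArg _ (ih m)

-- main invariant: A's loop from state (s, c, some q0) with c ≠ [] matches B's loop from s ++ [c]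
lemma pvMain (t : Int) : ∀ (ms : List (List (String × List (String × Int))))
    (s : List (List (List (String × List (String × Int))))) (c : List (List (String × List (String × Int)))) (q0 : Int),
    c ≠ [] →
    (let st := ms.foldl (pvStepA t) (s, c, some q0)
     if st.2.1 == [] then st.1 else st.1 ++ [st.2.1])
    = (ms.zip (pvFlagsFrom t q0 ms)).foldl pvStepB (s ++ [c]) := by
  intro ms
  induction ms with
  | nil =>
    intro s c q0 hc
    simp [List.foldl_nil, hc]
  | cons m r ih =>
    intro s c q0 hc
    simp only [pvFlagsFrom, List.zip_cons_cons, List.foldl_cons]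
    by_cases hf : ((q0 == 1) && ((pvQK m).1 == (pvQK m).2) && decide (t ≤ (pvQK m).1)) = true
    · have hA : pvStepA t (s, c, some q0) m = (s ++ [c], [m], some (pvQK m).1) := by
        simp only [pvStepA, pvQK] at hf ⊢
        rw [if_pos (by simp_all; omega)]
      have hB : pvStepB (s ++ [c]) (m, ((q0 == 1) && ((pvQK m).1 == (pvQK m).2) && decide (t ≤ (pvQK m).1))) = (s ++ [c]) ++ [[m]] := by
        simp [pvStepB, hf]
      rw [hA, hB]
      exact ih (s ++ [c]) [m] (pvQK m).1 (by simp)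
    · have hA : pvStepA t (s, c, some q0) m = (s, c ++ [m], some (pvQK m).1) := by
        simp only [pvStepA, pvQK] at hf ⊢
        rw [if_neg (by simp_all)]
      have hB : pvStepB (s ++ [c]) (m, ((q0 == 1) && ((pvQK m).1 == (pvQK m).2) && decide (t ≤ (pvQK m).1))) = s ++ [c ++ [m]] := by
        have hne : (s ++ [c] == ([] : List (List (List (String × List (String × Int)))))) = false := by simp
        simp [pvStepB, hf, hne]
      rw [hA, hB]
      exact ih s (c ++ [m]) (pvQK m).1 (by simp)

-- ===== VERDICT (by name: the statement is the Claim_ definition above) =====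
theorem group_metrics_by_sample_spec : Claim_equal_group_metrics_by_sample := by
  intro metrics t _
  show group_metrics_by_sample metrics t = group_metrics_by_sample_alt metrics t
  cases metrics with
  | nil => rfl
  | cons m r =>
    have hA0 : pvStepA t ([], [], none) m = ([], [m], some (pvQK m).1) := by
      simp [pvStepA, pvQK]
    have hB0 : pvStepB [] (m, false) = [[m]] := by
      simp [pvStepB]
    simp only [group_metrics_by_sample, group_metrics_by_sample_alt, List.map_cons,
      List.tail_cons, List.zip_cons_cons, List.foldl_cons, hA0, hB0]
    rw [if_neg (by simp), pvFlags_eq t r m]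
    have := pvMain t r [] [m] (pvQK m).1 (by simp)
    simpa using this
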